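-- pv_equiv track=rewrite | github.com/pirl-unc/presto | scripts/audit_mhc_groove.py | find_cys_pairs
-- ===== SOURCE A (Python) =====
-- def find_cys_pairs(
--     seq: str, min_sep: int = 48, max_sep: int = 72
-- ) -> list[tuple[int, int, int]]:
--     """
--     Find all Cys-Cys pairs with separation in [min_sep, max_sep].
--     Returns list of (cys1_idx, cys2_idx, separation).
--     Sorted by cys1_idx (N-terminal first).
--     """
--     cyss = [i for i, aa in enumerate(seq) if aa == "C"]
--     pairs = []
--     for i, c1 in enumerate(cyss):
--         for c2 in cyss[i + 1 :]:
--             d = c2 - c1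
--             if min_sep <= d <= max_sep:
--                 pairs.append((c1, c2, d))
--             elif d > max_sep:
--                 break
--     return pairs
-- ===== SOURCE B (Python) =====
-- from bisect import bisect_left, bisect_right
--
--
-- def find_cys_pairs(
--     seq: str, min_sep: int = 48, max_sep: int = 72
-- ) -> list[tuple[int, int, int]]:
--     """
--     Find all Cys-Cys pairs with separation in [min_sep, max_sep].
--     For each cysteine, binary-search the sorted index list for the
--     contiguous window of partners instead of scanning linearly.
--     """
--     cyss = [i for i, aa in enumerate(seq) if aa == "C"]
--     pairs = []
--     for i, c1 in enumerate(cyss):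
--         lo = max(i + 1, bisect_left(cyss, c1 + min_sep))
--         hi = bisect_right(cyss, c1 + max_sep)
--         pairs.extend((c1, c2, c2 - c1) for c2 in cyss[lo:hi])
--     return pairs
-- ===== Notes on version B (the rewrite author's own statement) =====
-- stated objective: alternative
-- what changed: The inner linear scan-with-break over later cysteines is replaced by two binary searches (bisect_left/bisect_right) that locate the contiguous window [c1+min_sep, c1+max_sep] in the sorted index list and emit exactly that slice.
import Mathlib
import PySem

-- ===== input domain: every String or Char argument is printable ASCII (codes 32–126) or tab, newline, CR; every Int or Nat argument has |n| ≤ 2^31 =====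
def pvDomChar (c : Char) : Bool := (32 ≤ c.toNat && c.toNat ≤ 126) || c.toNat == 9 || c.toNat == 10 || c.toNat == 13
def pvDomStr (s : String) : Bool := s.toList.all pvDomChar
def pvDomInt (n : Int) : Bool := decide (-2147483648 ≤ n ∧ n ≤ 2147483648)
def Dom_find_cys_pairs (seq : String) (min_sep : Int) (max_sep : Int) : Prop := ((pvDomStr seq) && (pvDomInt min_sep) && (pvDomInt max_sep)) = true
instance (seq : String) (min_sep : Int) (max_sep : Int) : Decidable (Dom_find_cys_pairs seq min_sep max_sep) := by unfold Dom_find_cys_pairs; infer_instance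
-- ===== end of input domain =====

-- B replaces A's inner linear scan-with-break by two binary searches that locate the window slice; equivalence of return values is proved.

-- ===== PORT A =====
-- inner 'for c2 in cyss[i+1:]' loop of A, with its break ('elif d > max_sep')
def pvInnerA (c1 min_sep max_sep : Int) : List Int → List (Int × Int × Int)
  | [] => []
  | c2 :: rest =>
    let d := c2 - c1
    if min_sep ≤ d ∧ d ≤ max_sep then (c1, c2, d) :: pvInnerA c1 min_sep max_sep rest
    else if max_sep < d then []
    else pvInnerA c1 min_sep max_sep rest

def find_cys_pairs (seq : String) (min_sep : Int) (max_sep : Int) : List (Int × Int × Int) :=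
  let cyss : List Int :=
    ((PySem.List.enumerate seq.toList).filter (fun p => p.2 == 'C')).map (fun p => p.1)
  (PySem.List.enumerate cyss).foldl
    (fun pairs p =>
      pairs ++ pvInnerA p.2 min_sep max_sep (PySem.List.slice cyss (some (p.1 + 1)) none))
    []

-- ===== PORT B =====
def find_cys_pairs_alt (seq : String) (min_sep : Int) (max_sep : Int) : List (Int × Int × Int) :=
  let cyss : List Int :=
    ((PySem.List.enumerate seq.toList).filter (fun p => p.2 == 'C')).map (fun p => p.1)
  (PySem.List.enumerate cyss).foldl
    (fun pairs p =>
      let lo : Int := max (p.1 + 1) ((PySem.List.bisectLeft cyss (p.2 + min_sep) : Nat) : Int)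
      let hi : Int := ((PySem.List.bisectRight cyss (p.2 + max_sep) : Nat) : Int)
      pairs ++ (PySem.List.slice cyss (some lo) (some hi)).map (fun c2 => (p.2, c2, c2 - p.2)))
    []

-- ===== PRECONDITION & SPEC =====
def Spec_find_cys_pairs (seq : String) (min_sep : Int) (max_sep : Int) (out : List (Int × Int × Int)) : Prop := out = find_cys_pairs_alt seq min_sep max_sep
instance (seq : String) (min_sep : Int) (max_sep : Int) (out : List (Int × Int × Int)) : Decidable (Spec_find_cys_pairs seq min_sep max_sep out) := by unfold Spec_find_cys_pairs; infer_instance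

-- ===== CLAIM (what is proved, stated in full; the proofs are below) =====
def Claim_equal_find_cys_pairs : Prop := ∀ (seq : String) (min_sep : Int) (max_sep : Int), Dom_find_cys_pairs seq min_sep max_sep → Spec_find_cys_pairs seq min_sep max_sep (find_cys_pairs seq min_sep max_sep)

-- ===== LEMMAS AND PROOFS =====

-- on a sorted suffix, A's scan-with-break collects exactly the window elements
lemma pvInnerA_eq_filter (c1 mn mx : Int) :
    ∀ (t : List Int), t.Pairwise (· < ·) →
      pvInnerA c1 mn mx t
        = (t.filter (fun v => decide (c1 + mn ≤ v) && decide (v ≤ c1 + mx))).map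
            (fun v => (c1, v, v - c1)) := by
  intro t
  induction t with
  | nil => intro _; simp [pvInnerA]
  | cons x xs ih =>
    intro hs
    rw [List.pairwise_cons] at hs
    obtain ⟨hx, hxs⟩ := hs
    by_cases h1 : mn ≤ x - c1 ∧ x - c1 ≤ mx
    · simp only [pvInnerA, if_pos h1, ih hxs]
      rw [List.filter_cons_of_pos (by simp; omega)]
      simp
    · by_cases h2 : mx < x - c1
      · simp only [pvInnerA, if_neg h1, if_pos h2]
        rw [List.filter_cons_of_neg (by simp; omega)]
        rw [List.filter_eq_nil_iff.mpr ?_]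
        · simp
        · intro v hv
          have := hx v hv
          simp; omega
      · simp only [pvInnerA, if_neg h1, if_neg h2, ih hxs]
        rw [List.filter_cons_of_neg (by simp; omega)]

-- split-count: if a predicate holds exactly on the first k positions, countP = k
lemma pvCountP_eq_of_split (p : Int → Bool) (L : List Int) (k : Nat) (hk : k ≤ L.length)
    (h1 : ∀ j (hj : j < L.length), j < k → p L[j])
    (h2 : ∀ j (hj : j < L.length), k ≤ j → ¬ p L[j] = true) :
    L.countP p = k := by
  conv_lhs => rw [← List.take_append_drop k L]
  rw [List.countP_append]
  have hA : (L.take k).countP p = k := by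
    rw [List.countP_eq_length.mpr]
    · simp [hk]
    · intro v hv
      obtain ⟨j, hj, rfl⟩ := List.mem_iff_getElem.mp hv
      rw [List.getElem_take]
      exact h1 j (by simp at hj; omega) (by simp at hj; omega)
  have hB : (L.drop k).countP p = 0 := by
    rw [List.countP_eq_zero]
    intro v hv
    obtain ⟨j, hj, rfl⟩ := List.mem_iff_getElem.mp hv
    rw [List.getElem_drop]
    exact h2 (k + j) (by simp at hj; omega) (by omega)
  omega

lemma pvBisectLeft_eq_countP (L : List Int) (x : Int) (hs : L.Pairwise (· ≤ ·)) :
    L.countP (fun v => decide (v < x)) = PySem.List.bisectLeft L x := by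
  obtain ⟨hlen, hlt, hge⟩ := PySem.List.bisectLeft_spec L x hs
  exact pvCountP_eq_of_split _ L _ hlen
    (fun j hj hjk => by simpa using hlt j hj hjk)
    (fun j hj hjk => by have := hge j hj hjk; simp; omega)

lemma pvBisectRight_eq_countP (L : List Int) (x : Int) (hs : L.Pairwise (· ≤ ·)) :
    L.countP (fun v => decide (v ≤ x)) = PySem.List.bisectRight L x := by
  obtain ⟨hlen, hle, hgt⟩ := PySem.List.bisectRight_spec L x hs
  exact pvCountP_eq_of_split _ L _ hlen
    (fun j hj hjk => by simpa using hle j hj hjk)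
    (fun j hj hjk => by have := hgt j hj hjk; simp; omega)

-- on a strictly sorted list, the count-bounded slice is the window filter
lemma pvSorted_slice_filter (a b : Int) :
    ∀ (L : List Int), L.Pairwise (· < ·) →
      (L.drop (L.countP (fun v => decide (v < a)))).take
          (L.countP (fun v => decide (v ≤ b)) - L.countP (fun v => decide (v < a)))
        = L.filter (fun v => decide (a ≤ v) && decide (v ≤ b)) := by
  intro L
  induction L with
  | nil => intro _; simp
  | cons x xs ih =>
    intro hs
    rw [List.pairwise_cons] at hs
    obtain ⟨hx, hxs⟩ := hs
    by_cases hxa : x < a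
    · by_cases hxb : x ≤ b
      · rw [List.countP_cons, List.countP_cons]
        simp only [hxa, hxb, decide_true, if_true]
        rw [List.filter_cons_of_neg (by simp; omega)]
        have : (x :: xs).drop (xs.countP (fun v => decide (v < a)) + 1)
            = xs.drop (xs.countP (fun v => decide (v < a))) := by simp
        rw [this, Nat.add_sub_add_right]
        exact ih hxs
      · have hbr : (x :: xs).countP (fun v => decide (v ≤ b)) = 0 := by
          rw [List.countP_eq_zero]
          intro v hv
          rcases List.mem_cons.mp hv with rfl | hv'
          · simp; omega
          · have := hx v hv'; simp; omega
        rw [hbr]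
        simp only [Nat.zero_sub, List.take_zero]
        rw [List.filter_eq_nil_iff.mpr ?_]
        intro v hv
        rcases List.mem_cons.mp hv with rfl | hv'
        · simp; omega
        · have := hx v hv'; simp; omega
    · have hbl : (x :: xs).countP (fun v => decide (v < a)) = 0 := by
        rw [List.countP_eq_zero]
        intro v hv
        rcases List.mem_cons.mp hv with rfl | hv'
        · simp; omega
        · have := hx v hv'; simp; omega
      have hblxs : xs.countP (fun v => decide (v < a)) = 0 := by
        rw [List.countP_eq_zero]
        intro v hv
        have := hx v hv; simp; omega
      rw [hbl]
      by_cases hxb : x ≤ b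
      · rw [List.countP_cons]
        simp only [hxb, decide_true, if_true]
        rw [List.drop_zero, Nat.sub_zero, List.take_succ_cons]
        rw [List.filter_cons_of_pos (by simp; omega)]
        have := ih hxs
        rw [hblxs, List.drop_zero, Nat.sub_zero] at this
        rw [this]
      · have hbr : (x :: xs).countP (fun v => decide (v ≤ b)) = 0 := by
          rw [List.countP_eq_zero]
          intro v hv
          rcases List.mem_cons.mp hv with rfl | hv'
          · simp; omega
          · have := hx v hv'; simp; omega
        rw [hbr]
        simp only [Nat.zero_sub, List.take_zero]
        rw [List.filter_eq_nil_iff.mpr ?_]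
        intro v hv
        rcases List.mem_cons.mp hv with rfl | hv'
        · simp; omega
        · have := hx v hv'; simp; omega

-- the clamped bisect window of B equals the window filter of the suffix after position k
lemma pvSlice_window (L : List Int) (hs : L.Pairwise (· < ·)) (k : Nat) (hk : k < L.length)
    (mn mx : Int) :
    (L.drop (max (k + 1) (PySem.List.bisectLeft L (L[k] + mn)))).take
        (PySem.List.bisectRight L (L[k] + mx) - max (k + 1) (PySem.List.bisectLeft L (L[k] + mn)))
      = (L.drop (k + 1)).filter
          (fun v => decide (L[k] + mn ≤ v) && decide (v ≤ L[k] + mx)) := by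
  have hsle : L.Pairwise (· ≤ ·) := hs.imp (fun h => le_of_lt h)
  set a := L[k] + mn with ha
  set b := L[k] + mx with hb
  obtain ⟨hblLen, hblLt, hblGe⟩ := PySem.List.bisectLeft_spec L a hsle
  obtain ⟨hbrLen, hbrLe, hbrGt⟩ := PySem.List.bisectRight_spec L b hsle
  rcases le_or_gt (k + 1) (PySem.List.bisectLeft L a) with hcase | hcase
  · rw [Nat.max_eq_right hcase]
    rw [← pvBisectLeft_eq_countP L a hsle, ← pvBisectRight_eq_countP L b hsle]
    rw [pvSorted_slice_filter a b L hs]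
    conv_lhs => rw [← List.take_append_drop (k + 1) L]
    rw [List.filter_append]
    rw [List.filter_eq_nil_iff.mpr ?_]
    · simp
    · intro v hv
      obtain ⟨j, hj, rfl⟩ := List.mem_iff_getElem.mp hv
      rw [List.getElem_take]
      have hjlt : j < PySem.List.bisectLeft L a := by simp at hj; omega
      have := hblLt j (by simp at hj; omega) hjlt
      simp; omega
  · rw [Nat.max_eq_left (by omega)]
    set t := L.drop (k + 1) with ht
    have hts : t.Pairwise (· < ·) := hs.sublist (List.drop_sublist _ _)
    have htlen : t.length = L.length - (k + 1) := by simp [ht]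
    have htget : ∀ j (hj : j < t.length), t[j] = L[k + 1 + j]'(by omega) := by
      intro j hj
      simp only [ht]
      rw [List.getElem_drop]
    have hta : ∀ j (hj : j < t.length), a ≤ t[j] := by
      intro j hj
      rw [htget j hj]
      exact hblGe (k + 1 + j) (by omega) (by omega)
    have h0 : t.countP (fun v => decide (v < a)) = 0 := by
      rw [List.countP_eq_zero]
      intro v hv
      obtain ⟨j, hj, rfl⟩ := List.mem_iff_getElem.mp hv
      have := hta j hj; simp; omega
    have hcnt : t.countP (fun v => decide (v ≤ b)) = PySem.List.bisectRight L b - (k + 1) := by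
      rcases le_or_gt (PySem.List.bisectRight L b) (k + 1) with hbr | hbr
      · rw [Nat.sub_eq_zero_of_le hbr, List.countP_eq_zero]
        intro v hv
        obtain ⟨j, hj, rfl⟩ := List.mem_iff_getElem.mp hv
        rw [htget j hj]
        have := hbrGt (k + 1 + j) (by omega) (by omega)
        simp; omega
      · apply pvCountP_eq_of_split _ t _ (by omega)
        · intro j hj hjk
          rw [htget j hj]
          have := hbrLe (k + 1 + j) (by omega) (by omega)
          simpa using this
        · intro j hj hjk
          rw [htget j hj]
          have := hbrGt (k + 1 + j) (by omega) (by omega)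
          simp; omega
    have := pvSorted_slice_filter a b t hts
    rw [h0, hcnt, List.drop_zero, Nat.sub_zero] at this
    exact this

-- per-cysteine: A's inner loop equals B's mapped slice
lemma pvPerElem (L : List Int) (hs : L.Pairwise (· < ·)) (k : Nat) (hk : k < L.length)
    (mn mx : Int) :
    pvInnerA L[k] mn mx (L.drop (k + 1))
      = ((L.drop (max (k + 1) (PySem.List.bisectLeft L (L[k] + mn)))).take
            (PySem.List.bisectRight L (L[k] + mx)
              - max (k + 1) (PySem.List.bisectLeft L (L[k] + mn)))).map
          (fun v => (L[k], v, v - L[k])) := by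
  rw [pvSlice_window L hs k hk mn mx]
  exact pvInnerA_eq_filter L[k] mn mx (L.drop (k + 1)) (hs.sublist (List.drop_sublist _ _))

theorem find_cys_pairs_spec : Claim_equal_find_cys_pairs := by
  intro seq min_sep max_sep _
  unfold Spec_find_cys_pairs find_cys_pairs find_cys_pairs_alt
  set cyss : List Int :=
    ((PySem.List.enumerate seq.toList).filter (fun p => p.2 == 'C')).map (fun p => p.1) with hcyss
  have hsorted : cyss.Pairwise (· < ·) := by
    rw [hcyss]
    exact List.Pairwise.map _ (fun a b h => h)
      ((PySem.List.pairwise_lt_enumerate seq.toList 0).filter _)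
  rw [PySem.List.foldl_append_eq_flatMap, PySem.List.foldl_append_eq_flatMap]
  simp only [List.nil_append]
  apply List.flatMap_congr
  intro p hp
  obtain ⟨k, hk, rfl⟩ := (PySem.List.mem_enumerate_iff cyss 0 p).mp hp
  simp only [zero_add]
  have h1 : ((k : Int) + 1) = ((k + 1 : Nat) : Int) := by push_cast; ring
  rw [h1]
  rw [show max (((k + 1 : Nat) : Int)) ((PySem.List.bisectLeft cyss (cyss[k] + min_sep) : Nat) : Int)
      = ((max (k + 1) (PySem.List.bisectLeft cyss (cyss[k] + min_sep)) : Nat) : Int)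
      from (Nat.cast_max _ _).symm]
  rw [PySem.List.slice_from_natCast, PySem.List.slice_natCast]
  exact pvPerElem cyss hsorted k hk min_sep max_sep
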